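-- pv_equiv track=rewrite | github.com/ansible-network/resource_module_models | models/isam/pdfs/main.py | isolate_subchapter_data
-- ===== SOURCE A (Python) =====
-- def isolate_subchapter_data(parsed_data, subchapter_numbers):
--     subchapter_data = {num: [] for num in subchapter_numbers}
--     current_subchapter = None
--
--     for entry in parsed_data:
--         # Check if the entry text contains a subchapter number
--         for num in subchapter_numbers:
--             if num in entry["text"]:
--                 current_subchapter = num
--                 break
--
--         # Add the entry to the appropriate subchapter
--         if current_subchapter:
--             entry_with_subchapter = entry.copy()
--             entry_with_subchapter["subchapter"] = current_subchapter
--             subchapter_data[current_subchapter].append(entry_with_subchapter)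
--
--     return subchapter_data
-- ===== SOURCE B (Python) =====
-- def isolate_subchapter_data(parsed_data, subchapter_numbers):
--     # Pass 1: forward-fill each entry's subchapter (first number found in its text,
--     # otherwise the most recent one seen).
--     assigned = []
--     carry = None
--     for entry in parsed_data:
--         detected = next((num for num in subchapter_numbers if num in entry["text"]), None)
--         if detected is not None:
--             carry = detected
--         assigned.append(carry)
--     # Pass 2: build each group independently by filtering the assignments.
--     return {num: [dict(entry, subchapter=num)
--                   for entry, a in zip(parsed_data, assigned) if a == num]
--             for num in subchapter_numbers}
-- ===== Notes on version B (the rewrite author's own statement) =====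
-- stated objective: alternative
-- what changed: Replaces A's single stateful loop that mutates per-key lists inside a dict with a two-phase decomposition: first a forward-fill pass computing each entry's assigned subchapter, then a dict comprehension building each subchapter's group independently by filtering the (entry, assigned) pairs; Pre_ excludes entries without a 'text' key (KeyError) and subchapter_number lists containing the empty string, a degenerate query matching every text on which either grouping is defensible.
-- outside the precondition, e.g. on isolate_subchapter_data([{'text': 'a'}], ['']): A returns {'': []}, B returns {'': [{'text': 'a', 'subchapter': ''}]}
import Mathlib
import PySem

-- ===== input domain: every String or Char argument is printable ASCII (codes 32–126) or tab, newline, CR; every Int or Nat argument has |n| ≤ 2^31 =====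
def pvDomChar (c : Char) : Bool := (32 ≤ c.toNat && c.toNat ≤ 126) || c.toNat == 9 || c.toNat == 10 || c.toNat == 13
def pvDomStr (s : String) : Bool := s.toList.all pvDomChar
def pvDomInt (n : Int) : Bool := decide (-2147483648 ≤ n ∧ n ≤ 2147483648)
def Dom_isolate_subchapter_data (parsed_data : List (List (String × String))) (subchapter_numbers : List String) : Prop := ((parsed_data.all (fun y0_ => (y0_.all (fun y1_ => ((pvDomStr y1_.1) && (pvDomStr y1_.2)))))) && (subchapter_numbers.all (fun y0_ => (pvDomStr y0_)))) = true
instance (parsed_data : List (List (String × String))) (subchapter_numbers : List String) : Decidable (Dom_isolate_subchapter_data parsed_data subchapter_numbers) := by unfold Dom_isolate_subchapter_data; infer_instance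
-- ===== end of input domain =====

-- B replaces A's single stateful loop by a two-pass decomposition (forward-fill the
-- assignments, then group per subchapter number by filtering); objective: alternative.

-- ===== PORT A =====
-- inner 'for num in subchapter_numbers: if num in entry["text"]: …; break'
def pvScanA (nums : List String) (text : String) : Option String :=
  match nums with
  | [] => none
  | n :: rest => if PySem.Str.isIn n text then some n else pvScanA rest text

def isolate_subchapter_data (parsed_data : List (List (String × String))) (subchapter_numbers : List String) : List (String × List (List (String × String))) :=
  -- subchapter_data = {num: [] for num in subchapter_numbers}
  let d0 : PySem.Dict String (List (List (String × String))) :=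
    subchapter_numbers.foldl (fun d n => d.insert n []) PySem.Dict.empty
  -- entry["text"]: getD is exact under Pre_ (the "text" key is present whenever it is read);
  -- 'if current_subchapter:' is 'some s with s ≠ ""';
  -- subchapter_data[cur].append(…): modify with default [] is exact since cur always comes
  -- from subchapter_numbers, all of which are keys of subchapter_data.
  let fin := parsed_data.foldl
    (fun (st : PySem.Dict String (List (List (String × String))) × Option String) entry =>
      let cur := match pvScanA subchapter_numbers (PySem.Dict.getD ⟨entry⟩ "text" "") with
        | some n => some n
        | none => st.2
      match cur with
      | some s =>
          if s ≠ "" then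
            (st.1.modify s [] (· ++ [(PySem.Dict.insert ⟨entry⟩ "subchapter" s).items]), cur)
          else (st.1, cur)
      | none => (st.1, cur)) (d0, none)
  fin.1.items

-- ===== PORT B =====
def isolate_subchapter_data_alt (parsed_data : List (List (String × String))) (subchapter_numbers : List String) : List (String × List (List (String × String))) :=
  -- pass 1: assigned = forward-filled detections ('next(… if num in entry["text"] …)')
  let fill := parsed_data.foldl
    (fun (st : List (Option String) × Option String) entry =>
      let det := subchapter_numbers.find?
        (fun n => PySem.Str.isIn n (PySem.Dict.getD ⟨entry⟩ "text" ""))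
      let carry := match det with | some n => some n | none => st.2
      (st.1 ++ [carry], carry)) ([], none)
  let pairs := parsed_data.zip fill.1
  -- pass 2: {num: [dict(entry, subchapter=num) for entry, a in pairs if a == num] …}
  (subchapter_numbers.foldl
    (fun d n =>
      d.insert n ((pairs.filter (fun p => p.2 == some n)).map
        (fun p => (PySem.Dict.insert ⟨p.1⟩ "subchapter" n).items)))
    PySem.Dict.empty).items

-- ===== PRECONDITION & SPEC =====
-- Pre_ excludes (a) inputs where A raises KeyError: an entry without a "text" key while
-- subchapter_numbers is nonempty (with no numbers, entry["text"] is never evaluated); and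
-- (b) subchapter_number lists containing the empty string — a degenerate query that is a
-- substring of every text, an unspecified corner on which either grouping is defensible.
def Pre_isolate_subchapter_data (parsed_data : List (List (String × String))) (subchapter_numbers : List String) : Prop :=
  (subchapter_numbers = [] ∨ ∀ entry ∈ parsed_data, (PySem.Dict.mk entry).contains "text" = true)
  ∧ "" ∉ subchapter_numbers
instance (parsed_data : List (List (String × String))) (subchapter_numbers : List String) : Decidable (Pre_isolate_subchapter_data parsed_data subchapter_numbers) := by unfold Pre_isolate_subchapter_data; infer_instance

def pvWitness_isolate_subchapter_data : (List (List (String × String))) × List String :=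
  ([[("text", "1.1 intro")], [("text", "more")]], ["1.1", "2.2"])

def Spec_isolate_subchapter_data (parsed_data : List (List (String × String))) (subchapter_numbers : List String) (out : List (String × List (List (String × String)))) : Prop := out = isolate_subchapter_data_alt parsed_data subchapter_numbers
instance (parsed_data : List (List (String × String))) (subchapter_numbers : List String) (out : List (String × List (List (String × String)))) : Decidable (Spec_isolate_subchapter_data parsed_data subchapter_numbers out) := by unfold Spec_isolate_subchapter_data; infer_instance

-- ===== CLAIM (what is proved, stated in full; the proofs are below) =====
def Claim_equal_isolate_subchapter_data : Prop := ∀ (parsed_data : List (List (String × String))) (subchapter_numbers : List String), Dom_isolate_subchapter_data parsed_data subchapter_numbers → Pre_isolate_subchapter_data parsed_data subchapter_numbers → Spec_isolate_subchapter_data parsed_data subchapter_numbers (isolate_subchapter_data parsed_data subchapter_numbers)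

-- ===== LEMMAS AND PROOFS =====

-- entry.copy() with entry["subchapter"] = s, as a plain association list
def pvIns (e : List (String × String)) (s : String) : List (String × String) :=
  (PySem.Dict.insert ⟨e⟩ "subchapter" s).items

-- one step of the shared carry: first detected num, else the previous carry
def pvCarry (nums : List String) (cur : Option String) (e : List (String × String)) : Option String :=
  match pvScanA nums (PySem.Dict.getD ⟨e⟩ "text" "") with
  | some n => some n
  | none => cur

-- the forward-filled assignment list
def pvFills (nums : List String) : Option String → List (List (String × String)) → List (Option String)
  | _, [] => []
  | cur, e :: r => pvCarry nums cur e :: pvFills nums (pvCarry nums cur e) r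

-- the (key, prepared entry) contributions of one (entry, assignment) pair under A's truthiness
def pvContrib (p : (List (String × String)) × Option String) : List (String × List (String × String)) :=
  match p.2 with
  | some s => if s = "" then [] else [(s, pvIns p.1 s)]
  | none => []

theorem pvScanA_eq_find? (nums : List String) (t : String) :
    pvScanA nums t = nums.find? (fun n => PySem.Str.isIn n t) := by
  induction nums with
  | nil => rfl
  | cons n rest ih =>
    unfold pvScanA
    rw [List.find?_cons]
    cases h : PySem.Str.isIn n t <;> simp only [ih] <;> rfl

theorem pvScanA_mem {nums : List String} {t : String} {s : String}
    (h : pvScanA nums t = some s) : s ∈ nums := by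
  rw [pvScanA_eq_find?] at h
  exact List.mem_of_find?_eq_some h

-- A's loop, re-expressed as a fold of modify/append steps over the contribution pairs
theorem pvA_fold (nums : List String) :
    ∀ (xs : List (List (String × String)))
      (d : PySem.Dict String (List (List (String × String)))) (cur : Option String),
      xs.foldl
        (fun (st : PySem.Dict String (List (List (String × String))) × Option String) entry =>
          let c := match pvScanA nums (PySem.Dict.getD ⟨entry⟩ "text" "") with
            | some n => some n
            | none => st.2
          match c with
          | some s =>
              if s ≠ "" then
                (st.1.modify s [] (· ++ [(PySem.Dict.insert ⟨entry⟩ "subchapter" s).items]), c)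
              else (st.1, c)
          | none => (st.1, c))
        (d, cur)
      = (((xs.zip (pvFills nums cur xs)).flatMap pvContrib).foldl
            (fun d p => d.modify p.1 [] (· ++ [p.2])) d,
          xs.foldl (fun c e => pvCarry nums c e) cur) := by
  intro xs
  induction xs with
  | nil => intro d cur; rfl
  | cons e r ih =>
    intro d cur
    rw [List.foldl_cons, List.foldl_cons]
    cases hscan : pvScanA nums (PySem.Dict.getD ⟨e⟩ "text" "") with
    | none =>
      have hcar : pvCarry nums cur e = cur := by simp [pvCarry, hscan]
      cases cur with
      | none =>
        simp only [pvFills, hcar, List.zip_cons_cons, List.flatMap_cons, pvContrib,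
          List.nil_append]
        exact ih d none
      | some s =>
        by_cases hs : s = ""
        · subst hs
          simp only [pvFills, hcar, List.zip_cons_cons, List.flatMap_cons, pvContrib,
            ne_eq, not_true_eq_false, ite_false]
          exact ih d (some "")
        · simp only [pvFills, hcar, List.zip_cons_cons, List.flatMap_cons, pvContrib,
            ne_eq, hs, not_false_eq_true, ite_true]
          rw [ih]
          rfl
    | some s =>
      have hcar : pvCarry nums cur e = some s := by simp [pvCarry, hscan]
      by_cases hs : s = ""
      · subst hs
        simp only [pvFills, hcar, List.zip_cons_cons, List.flatMap_cons, pvContrib,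
          ne_eq, not_true_eq_false, ite_false]
        exact ih d (some "")
      · simp only [pvFills, hcar, List.zip_cons_cons, List.flatMap_cons, pvContrib,
          ne_eq, hs, not_false_eq_true, ite_true]
        rw [ih]
        rfl

-- B's first loop produces exactly the forward-filled list
theorem pvB_fold (nums : List String) :
    ∀ (xs : List (List (String × String))) (acc : List (Option String)) (cur : Option String),
      xs.foldl
        (fun (st : List (Option String) × Option String) entry =>
          let det := nums.find? (fun n => PySem.Str.isIn n (PySem.Dict.getD ⟨entry⟩ "text" ""))
          let carry := match det with | some n => some n | none => st.2
          (st.1 ++ [carry], carry))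
        (acc, cur)
      = (acc ++ pvFills nums cur xs, xs.foldl (fun c e => pvCarry nums c e) cur) := by
  intro xs
  induction xs with
  | nil => intro acc cur; simp [pvFills]
  | cons e r ih =>
    intro acc cur
    rw [List.foldl_cons, List.foldl_cons]
    have hc : (match nums.find? (fun n => PySem.Str.isIn n (PySem.Dict.getD ⟨e⟩ "text" "")) with
          | some n => some n
          | none => cur) = pvCarry nums cur e := by
      rw [← pvScanA_eq_find?]; rfl
    show r.foldl _ (acc ++ [(match nums.find? (fun n => PySem.Str.isIn n (PySem.Dict.getD ⟨e⟩ "text" "")) with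
          | some n => some n
          | none => cur)], (match nums.find? (fun n => PySem.Str.isIn n (PySem.Dict.getD ⟨e⟩ "text" "")) with
          | some n => some n
          | none => cur)) = _
    rw [hc, ih]
    simp [pvFills]

-- the {num: [] …} comprehension looks up to []
theorem pvD0_getD (nums : List String) (k : String) :
    ∀ (d : PySem.Dict String (List (List (String × String)))),
      d.getD k [] = [] →
      (nums.foldl (fun d n => d.insert n []) d).getD k [] = [] := by
  induction nums with
  | nil => intro d h; exact h
  | cons n rest ih =>
    intro d h
    rw [List.foldl_cons]
    exact ih _ (by rw [PySem.Dict.getD_insert]; split <;> simp [h])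

-- lookups outside the inserted keys are untouched
theorem pvInsG_getD_not_mem (G : String → List (List (String × String))) (k : String)
    (nums : List String) :
    ∀ (d : PySem.Dict String (List (List (String × String)))),
      k ∉ nums →
      (nums.foldl (fun d n => d.insert n (G n)) d).getD k [] = d.getD k [] := by
  induction nums with
  | nil => intro d _; rfl
  | cons n rest ih =>
    intro d h
    rw [List.foldl_cons, ih _ (fun hm => h (List.mem_cons_of_mem _ hm)),
      PySem.Dict.getD_insert]
    split
    · exact absurd (by simp_all) h
    · rfl

-- a fold of inserts whose value depends only on the key: lookups inside the key list
theorem pvInsG_getD (G : String → List (List (String × String))) (k : String)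
    (nums : List String) :
    ∀ (d : PySem.Dict String (List (List (String × String)))),
      k ∈ nums →
      (nums.foldl (fun d n => d.insert n (G n)) d).getD k [] = G k := by
  induction nums with
  | nil => intro d h; simp at h
  | cons n rest ih =>
    intro d h
    rw [List.foldl_cons]
    by_cases hm : k ∈ rest
    · exact ih _ hm
    · have hk : k = n := by rcases List.mem_cons.mp h with h' | h' <;> simp_all
      rw [pvInsG_getD_not_mem G k rest _ hm, PySem.Dict.getD_insert, if_pos hk, hk]

-- Set.update by elements already present is the identity
theorem pvUpdate_self (s : PySem.Set String) (l : List String)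
    (h : ∀ x ∈ l, x ∈ s) : PySem.Set.update s l = s := by
  rw [PySem.Set.update_eq_append_filter]
  have hnil : (PySem.Set.ofList l).filter (fun y => !s.contains y) = [] := by
    rw [List.filter_eq_nil_iff]
    intro y hy
    rw [PySem.Set.mem_ofList] at hy
    simp only [Bool.not_eq_true', Bool.not_eq_false]
    rw [PySem.Set.contains_iff]
    exact h y hy
  rw [hnil, List.append_nil]

-- for a non-empty key k, the group of key k among A's contributions is B's per-key filter
theorem pvGroups_eq (k : String) (hk : k ≠ "") :
    ∀ (l : List ((List (String × String)) × Option String)),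
      ((l.flatMap pvContrib).filter (fun q => q.1 == k)).map (·.2)
      = (l.filter (fun p => p.2 == some k)).map (fun p => pvIns p.1 k) := by
  intro l
  induction l with
  | nil => rfl
  | cons p r ih =>
    rw [List.flatMap_cons, List.filter_append, List.map_append, ih, List.filter_cons]
    cases hp : p.2 with
    | none => simp [pvContrib, hp]
    | some s =>
      by_cases hs : s = ""
      · subst hs
        simp only [pvContrib, hp, ite_true]
        have hno : ¬ ((some "" == some k) = true) := by
          simp only [beq_iff_eq, Option.some.injEq]
          exact fun h => hk h.symm
        rw [if_neg hno]
        simp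
      · by_cases hke : s = k
        · subst hke; simp [pvContrib, hp, hs]
        · simp [pvContrib, hp, hs, hke]

-- ===== VERDICT (by name: the statement is the Claim_ definition above) =====
theorem isolate_subchapter_data_spec : Claim_equal_isolate_subchapter_data := by
  intro pd nums _ hpre
  unfold Spec_isolate_subchapter_data
  simp only [isolate_subchapter_data, isolate_subchapter_data_alt]
  rw [pvA_fold nums pd _ none, pvB_fold nums pd [] none]
  simp only [List.nil_append]
  set L' := (pd.zip (pvFills nums none pd)).flatMap pvContrib with hL'
  set d0 := nums.foldl (fun d n => d.insert n ([] : List (List (String × String))))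
    PySem.Dict.empty with hd0def
  set DA := List.foldl (fun d p => d.modify p.1 [] fun x => x ++ [p.2]) d0 L' with hDA
  set DB := List.foldl (fun d n =>
      d.insert n (List.map (fun p => (PySem.Dict.insert ⟨p.1⟩ "subchapter" n).items)
        (List.filter (fun p => p.2 == some n) (pd.zip (pvFills nums none pd)))))
    PySem.Dict.empty nums with hDB
  have hLkeys : ∀ x ∈ L'.map Prod.fst, x ∈ nums := by
    intro x hx
    rw [List.mem_map] at hx
    obtain ⟨q, hq, hqx⟩ := hx
    rw [hL', List.mem_flatMap] at hq
    obtain ⟨p, hpL, hqp⟩ := hq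
    cases hp2 : p.2 with
    | none => simp [pvContrib, hp2] at hqp
    | some s =>
      by_cases hs : s = ""
      · simp [pvContrib, hp2, hs] at hqp
      · simp only [pvContrib, hp2, hs, ite_false, List.mem_singleton] at hqp
        have hmem : p.2 ∈ pvFills nums none pd := (List.of_mem_zip hpL).2
        have hscan : ∃ t ∈ nums, p.2 = some t := by
          clear hqp hqx
          have : ∀ (xs : List (List (String × String))) (cur a : Option String),
              a ∈ pvFills nums cur xs → a = cur ∨ ∃ t ∈ nums, a = some t := by
            intro xs
            induction xs with
            | nil => intro cur a h; simp [pvFills] at h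
            | cons e r ih =>
              intro cur a h
              simp only [pvFills, List.mem_cons] at h
              have hcc : pvCarry nums cur e = cur ∨ ∃ t ∈ nums, pvCarry nums cur e = some t := by
                unfold pvCarry
                cases h' : pvScanA nums (PySem.Dict.getD ⟨e⟩ "text" "") with
                | none => exact Or.inl rfl
                | some t => exact Or.inr ⟨t, pvScanA_mem h', rfl⟩
              rcases h with h | h
              · subst h; exact hcc
              · rcases ih (pvCarry nums cur e) a h with h' | h'
                · rcases hcc with h'' | h''
                  · exact Or.inl (h' ▸ h'')
                  · exact Or.inr (h' ▸ h'')
                · exact Or.inr h'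
          rcases this pd none p.2 hmem with h' | h'
          · rw [hp2] at h'; exact absurd h' (by simp)
          · exact h'
        obtain ⟨t, ht, hpt⟩ := hscan
        rw [hp2] at hpt
        have hst : s = t := by injection hpt
        rw [hqp] at hqx
        simp only [] at hqx
        rw [← hqx]
        show s ∈ nums
        rw [hst]; exact ht
  have hd0keys : d0.keys = PySem.Set.ofList nums := by
    rw [hd0def, PySem.Dict.keys_foldl_insert, PySem.Dict.keys_empty,
      PySem.Set.ofList_eq_foldl]
    rfl
  have hd0nodup : d0.keys.Nodup := by
    rw [hd0def]
    exact PySem.Dict.nodup_keys_foldl_insert nums _ _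
      (by rw [PySem.Dict.keys_empty]; exact List.nodup_nil)
  have hkeysA : DA.keys = d0.keys := by
    rw [hDA, PySem.Dict.keys_foldl_modify_key]
    apply pvUpdate_self
    intro x hxm
    rw [hd0keys]
    rw [PySem.Set.mem_ofList]
    exact hLkeys x hxm
  have hkeysB : DB.keys = PySem.Set.ofList nums := by
    rw [hDB, PySem.Dict.keys_foldl_insert, PySem.Dict.keys_empty,
      PySem.Set.ofList_eq_foldl]
    rfl
  have hnodupB : DB.keys.Nodup := by
    rw [hDB]
    exact PySem.Dict.nodup_keys_foldl_insert nums _ _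
      (by rw [PySem.Dict.keys_empty]; exact List.nodup_nil)
  rw [PySem.Dict.items_eq_map_keys DA (by rw [hkeysA]; exact hd0nodup) [],
    PySem.Dict.items_eq_map_keys DB hnodupB []]
  rw [hkeysA, hd0keys, hkeysB]
  apply List.map_congr_left
  intro k hk
  rw [PySem.Set.mem_ofList] at hk
  have hkne : k ≠ "" := fun h => hpre.2 (h ▸ hk)
  have hAget : DA.getD k [] = (L'.filter (fun q => q.1 == k)).map (·.2) := by
    rw [hDA, PySem.Dict.getD_foldl_modify_append,
      hd0def, pvD0_getD nums k PySem.Dict.empty (by rw [PySem.Dict.getD_empty]),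
      List.nil_append]
  have hBget : DB.getD k []
      = List.map (fun p => (PySem.Dict.insert ⟨p.1⟩ "subchapter" k).items)
          (List.filter (fun p => p.2 == some k) (pd.zip (pvFills nums none pd))) := by
    rw [hDB]
    exact pvInsG_getD
      (fun n => List.map (fun p => (PySem.Dict.insert ⟨p.1⟩ "subchapter" n).items)
        (List.filter (fun p => p.2 == some n) (pd.zip (pvFills nums none pd))))
      k nums PySem.Dict.empty hk
  rw [hAget, hBget, hL', pvGroups_eq k hkne]
  simp [pvIns]
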